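-- pv_equiv track=rewrite | github.com/piyushchugeja/wordle | wordle.py | correct_letters
-- ===== SOURCE A (Python) =====
-- def correct_letters(word, guess):
--     letters = []
--     for i in word:
--         if i in guess and i not in letters and word.count(i) == 1:
--             letters.append(i)
--         elif i in guess and word.count(i) > 1:
--             if guess.count(i) != letters.count(i):
--                 letters.append(i)
--     return letters
-- ===== SOURCE B (Python) =====
-- def correct_letters(word, guess):
--     gcount = {}
--     for ch in guess:
--         gcount[ch] = gcount.get(ch, 0) + 1
--     remaining = {}
--     for ch in word:
--         remaining[ch] = remaining.get(ch, 0) + 1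
--     for ch in remaining:
--         remaining[ch] = min(remaining[ch], gcount.get(ch, 0))
--     out = []
--     for ch in word:
--         if remaining[ch] > 0:
--             out.append(ch)
--             remaining[ch] -= 1
--     return out
-- ===== Notes on version B (the rewrite author's own statement) =====
-- stated objective: faster
-- what changed: B precomputes a table remaining[ch] = min(word.count(ch), guess.count(ch)) from two letter-count dicts and then makes one uniform pass over word appending while remaining[ch] > 0, replacing A's per-character word.count/guess.count/letters.count rescans and its separate count==1 / count>1 branch logic.
import Mathlib
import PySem

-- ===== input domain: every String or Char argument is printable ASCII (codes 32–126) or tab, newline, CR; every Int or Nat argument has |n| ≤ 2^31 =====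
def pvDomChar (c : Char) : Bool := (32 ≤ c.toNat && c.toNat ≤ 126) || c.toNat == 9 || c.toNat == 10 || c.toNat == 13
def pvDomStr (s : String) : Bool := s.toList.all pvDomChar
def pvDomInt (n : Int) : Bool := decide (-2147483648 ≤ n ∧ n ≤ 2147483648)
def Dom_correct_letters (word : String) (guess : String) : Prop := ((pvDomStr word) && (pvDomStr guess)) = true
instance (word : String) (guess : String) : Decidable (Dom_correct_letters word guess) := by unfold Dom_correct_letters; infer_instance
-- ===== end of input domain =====

-- B replaces A's repeated word.count/guess.count/letters.count scans and its two-branch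
-- count==1 / count>1 split by one precomputed table remaining[ch] = min(word.count(ch),
-- guess.count(ch)) and a single uniform pass over word (objective: faster, measured).

-- ===== PORT A =====
def correct_letters (word : String) (guess : String) : List String :=
  word.toList.foldl (fun letters i =>
    if PySem.Str.isIn (String.singleton i) guess = true ∧ String.singleton i ∉ letters ∧
        PySem.Str.count word (String.singleton i) = 1 then
      letters ++ [String.singleton i]
    else if PySem.Str.isIn (String.singleton i) guess = true ∧
        1 < PySem.Str.count word (String.singleton i) then
      if PySem.Str.count guess (String.singleton i) ≠ List.count (String.singleton i) letters then
        letters ++ [String.singleton i]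
      else letters
    else letters) []

-- ===== PORT B =====
-- transliteration of Source B; `remaining[ch]` is ported as getD ch 0 — exact, the key is always present
def correct_letters_alt (word : String) (guess : String) : List String :=
  let gcount : PySem.Dict Char Int :=
    guess.toList.foldl (fun d ch => d.insert ch (d.getD ch 0 + 1)) PySem.Dict.empty
  let rem0 : PySem.Dict Char Int :=
    word.toList.foldl (fun d ch => d.insert ch (d.getD ch 0 + 1)) PySem.Dict.empty
  let rem1 : PySem.Dict Char Int :=
    rem0.keys.foldl (fun d ch => d.insert ch (min (d.getD ch 0) (gcount.getD ch 0))) rem0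
  (word.toList.foldl (fun (s : PySem.Dict Char Int × List String) ch =>
      if 0 < s.1.getD ch 0 then (s.1.insert ch (s.1.getD ch 0 - 1), s.2 ++ [String.singleton ch])
      else s) (rem1, [])).2

-- ===== PRECONDITION & SPEC =====
def Spec_correct_letters (word : String) (guess : String) (out : List String) : Prop := out = correct_letters_alt word guess
instance (word : String) (guess : String) (out : List String) : Decidable (Spec_correct_letters word guess out) := by unfold Spec_correct_letters; infer_instance

-- ===== CLAIM (what is proved, stated in full; the proofs are below) =====
def Claim_equal_correct_letters : Prop := ∀ (word : String) (guess : String), Dom_correct_letters word guess → Spec_correct_letters word guess (correct_letters word guess)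

-- ===== LEMMAS AND PROOFS =====

theorem pvGoSingleton (c : Char) (l : List Char) : ∀ (fuel acc : ℕ), l.length ≤ fuel →
    PySem.Chars.count.go [c] fuel l acc = acc + l.count c := by
  induction l with
  | nil => intro fuel acc h; cases fuel <;> simp [PySem.Chars.count.go]
  | cons hd t ih =>
    intro fuel acc h
    cases fuel with
    | zero => simp at h
    | succ n =>
      rw [PySem.Chars.count.go]
      by_cases hc : hd = c
      · simp [hc, List.isPrefixOf, ih n (acc + 1) (by simpa using h)]
        ring
      · simp [List.isPrefixOf, Ne.symm hc, hc, ih n acc (by simpa using h)]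

-- str.count with a single-character needle is the character count
theorem pvCountSingleton (s : List Char) (c : Char) : PySem.Chars.count s [c] = s.count c := by
  simp [PySem.Chars.count, pvGoSingleton c s s.length 0 le_rfl]

theorem pvIsInSingleton (s : List Char) (c : Char) : PySem.Chars.isIn [c] s = true ↔ c ∈ s := by
  rw [PySem.Chars.isIn_iff_infix, List.singleton_infix_iff]

theorem pvSingletonInj : Function.Injective String.singleton := by
  intro a b h
  have := congrArg String.toList h
  simpa using this

-- the third loop of Source B: rewriting every value at the (nodup) key list
theorem pvFoldlInsertMin (gc : PySem.Dict Char Int) :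
    ∀ (ks : List Char), ks.Nodup → ∀ (d : PySem.Dict Char Int) (k : Char),
    (ks.foldl (fun d ch => d.insert ch (min (d.getD ch 0) (gc.getD ch 0))) d).getD k 0 =
      if k ∈ ks then min (d.getD k 0) (gc.getD k 0) else d.getD k 0 := by
  intro ks
  induction ks with
  | nil => intro _ d k; simp
  | cons c t ih =>
    intro hnd d k
    have hct : c ∉ t := (List.nodup_cons.mp hnd).1
    rw [List.foldl_cons, ih (List.nodup_cons.mp hnd).2]
    by_cases hk : k ∈ t
    · have hkc : k ≠ c := fun h => hct (h ▸ hk)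
      simp [hk, hkc, PySem.Dict.getD_insert, List.mem_cons]
    · by_cases hkc : k = c
      · subst hkc; simp [hk]
      · simp [hk, hkc, PySem.Dict.getD_insert, List.mem_cons]

-- the main pass: A's letters list and B's (remaining, out) pair stay in lockstep
theorem pvMainLoop (word guess : String) :
    ∀ (l : List Char) (L : List Char) (rem : PySem.Dict Char Int),
    (∀ ch, rem.getD ch 0 =
        (min (word.toList.count ch) (guess.toList.count ch) : Int) - (L.count ch : Int)) →
    (∀ ch, L.count ch ≤ min (word.toList.count ch) (guess.toList.count ch)) →
    (∀ ch, L.count ch + l.count ch ≤ word.toList.count ch) →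
    l.foldl (fun letters i =>
      if PySem.Str.isIn (String.singleton i) guess = true ∧ String.singleton i ∉ letters ∧
          PySem.Str.count word (String.singleton i) = 1 then
        letters ++ [String.singleton i]
      else if PySem.Str.isIn (String.singleton i) guess = true ∧
          1 < PySem.Str.count word (String.singleton i) then
        if PySem.Str.count guess (String.singleton i) ≠ List.count (String.singleton i) letters then
          letters ++ [String.singleton i]
        else letters
      else letters) (L.map String.singleton) =
    (l.foldl (fun (s : PySem.Dict Char Int × List String) ch =>
        if 0 < s.1.getD ch 0 then (s.1.insert ch (s.1.getD ch 0 - 1), s.2 ++ [String.singleton ch])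
        else s) (rem, L.map String.singleton)).2 := by
  intro l
  induction l with
  | nil => intro L rem _ _ _; rfl
  | cons c t ih =>
    intro L rem h1 h2 h3
    -- abbreviations
    set w := word.toList.count c with hw
    set g := guess.toList.count c with hg
    set k := L.count c with hk
    have hkw : k < w := by
      have := h3 c
      simp [List.count_cons_self] at this
      omega
    have hcnt : PySem.Str.count word (String.singleton c) = w := by
      simp [PySem.Str.count_eq, pvCountSingleton, hw]
    have hcntg : PySem.Str.count guess (String.singleton c) = g := by
      simp [PySem.Str.count_eq, pvCountSingleton, hg]
    have hmem : (PySem.Str.isIn (String.singleton c) guess = true) ↔ c ∈ guess.toList := by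
      simp only [PySem.Str.isIn_eq, String.toList_singleton]
      exact pvIsInSingleton _ _
    have hLmem : String.singleton c ∈ L.map String.singleton ↔ c ∈ L := by
      constructor
      · rintro h
        rcases List.mem_map.mp h with ⟨a, ha, hae⟩
        rwa [pvSingletonInj hae] at ha
      · intro h; exact List.mem_map_of_mem h
    have hLcount : List.count (String.singleton c) (L.map String.singleton) = k := by
      simpa using List.count_map_of_injective L String.singleton pvSingletonInj c
    have hrem : rem.getD c 0 = (min w g : Int) - (k : Int) := h1 c
    simp only [List.foldl_cons]
    by_cases hcg : c ∈ guess.toList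
    · have hg1 : 1 ≤ g := List.count_pos_iff.mpr hcg
      by_cases happ : k < min w g
      · -- both append
        have hB : (0 : Int) < rem.getD c 0 := by
          rw [hrem]; omega
        have hA : (if PySem.Str.isIn (String.singleton c) guess = true ∧
              String.singleton c ∉ L.map String.singleton ∧
              PySem.Str.count word (String.singleton c) = 1 then
            L.map String.singleton ++ [String.singleton c]
          else if PySem.Str.isIn (String.singleton c) guess = true ∧
              1 < PySem.Str.count word (String.singleton c) then
            if PySem.Str.count guess (String.singleton c) ≠
                List.count (String.singleton c) (L.map String.singleton) then
              L.map String.singleton ++ [String.singleton c]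
            else L.map String.singleton
          else L.map String.singleton) = L.map String.singleton ++ [String.singleton c] := by
          rcases Nat.lt_or_ge 1 w with hwgt | hwle
          · -- w > 1: second branch fires, inner test true
            have hne : g ≠ k := by omega
            rw [if_neg, if_pos ⟨hmem.mpr hcg, by omega⟩, if_pos]
            · rw [hcntg, hLcount]; exact hne
            · rintro ⟨_, _, hcw⟩; omega
          · -- w = 1 (k < w forces w = 1 here): first branch fires
            have hw1 : w = 1 := by omega
            have hk0 : k = 0 := by omega
            rw [if_pos ⟨hmem.mpr hcg, by
              rw [hLmem]; exact fun hmem' => by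
                have := List.count_pos_iff.mpr hmem'; omega, by omega⟩]
        rw [hA, if_pos hB]
        have : L.map String.singleton ++ [String.singleton c] = (L ++ [c]).map String.singleton := by
          simp
        rw [this]
        apply ih (L ++ [c])
        · intro ch
          by_cases hch : ch = c
          · subst hch
            rw [PySem.Dict.getD_insert, if_pos rfl, hrem]
            have hc1 : (L ++ [ch]).count ch = k + 1 := by simp [hk]
            rw [hc1, ← hw, ← hg]; push_cast; ring
          · have hc0 : (L ++ [c]).count ch = L.count ch := by
              simp [List.count_append, Ne.symm hch]
            rw [PySem.Dict.getD_insert, if_neg hch, h1 ch, hc0]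
        · intro ch
          by_cases hch : ch = c
          · subst hch
            have hc1 : (L ++ [ch]).count ch = k + 1 := by simp [hk]
            rw [hc1, ← hw, ← hg]; omega
          · have hc0 : (L ++ [c]).count ch = L.count ch := by
              simp [List.count_append, Ne.symm hch]
            rw [hc0]; exact h2 ch
        · intro ch
          have h3' := h3 ch
          rw [List.count_cons] at h3'
          by_cases hch : ch = c
          · subst hch
            have hc1 : (L ++ [ch]).count ch = k + 1 := by simp [hk]
            rw [hc1, ← hk] at *
            simp at h3'
            omega
          · have hc0 : (L ++ [c]).count ch = L.count ch := by
              simp [List.count_append, Ne.symm hch]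
            rw [hc0]
            simp [Ne.symm hch] at h3'
            omega
      · -- neither appends: k = min w g
        have hkeq : k = min w g := by have := h2 c; omega
        have hB : ¬ (0 : Int) < rem.getD c 0 := by rw [hrem]; omega
        have hA : (if PySem.Str.isIn (String.singleton c) guess = true ∧
              String.singleton c ∉ L.map String.singleton ∧
              PySem.Str.count word (String.singleton c) = 1 then
            L.map String.singleton ++ [String.singleton c]
          else if PySem.Str.isIn (String.singleton c) guess = true ∧
              1 < PySem.Str.count word (String.singleton c) then
            if PySem.Str.count guess (String.singleton c) ≠
                List.count (String.singleton c) (L.map String.singleton) then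
              L.map String.singleton ++ [String.singleton c]
            else L.map String.singleton
          else L.map String.singleton) = L.map String.singleton := by
          rcases Nat.lt_or_ge 1 w with hwgt | hwle
          · -- w > 1: min w g = g here (k < w), inner test g = count fails
            have hgk : g = k := by omega
            rw [if_neg, if_pos ⟨hmem.mpr hcg, by omega⟩, if_neg]
            · rw [hcntg, hLcount]; omega
            · rintro ⟨_, _, hcw⟩; omega
          · -- w = 1, k = min 1 g = 1: c already in L
            have hw1 : w = 1 := by omega
            have hk1 : k = 1 := by omega
            have hcL : c ∈ L := by
              rw [← List.count_pos_iff]; omega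
            rw [if_neg, if_neg]
            · rintro ⟨_, hcw⟩; omega
            · rintro ⟨_, hnot, _⟩; exact hnot (hLmem.mpr hcL)
        rw [hA, if_neg hB]
        apply ih L rem h1 h2
        intro ch
        have := h3 ch
        simp [List.count_cons] at this ⊢
        omega
    · -- c not in guess: nothing happens on either side
      have hg0 : g = 0 := List.count_eq_zero.mpr hcg
      have hk0 : k = 0 := by have := h2 c; omega
      have hB : ¬ (0 : Int) < rem.getD c 0 := by rw [hrem]; omega
      have hnm : ¬ PySem.Str.isIn (String.singleton c) guess = true := fun h => hcg (hmem.mp h)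
      rw [if_neg (fun h => hnm h.1), if_neg (fun h => hnm h.1), if_neg hB]
      apply ih L rem h1 h2
      intro ch
      have := h3 ch
      simp [List.count_cons] at this ⊢
      omega

-- ===== VERDICT (by name: the statement is the Claim_ definition above) =====
theorem correct_letters_spec : Claim_equal_correct_letters := by
  intro word guess _
  unfold Spec_correct_letters correct_letters correct_letters_alt
  rw [PySem.Dict.foldl_insert_getD_add_one_eq_counter, PySem.Dict.foldl_insert_getD_add_one_eq_counter]
  have hrem1 : ∀ ch,
      ((PySem.Dict.counter word.toList).keys.foldl
        (fun d ch => d.insert ch (min (d.getD ch 0) ((PySem.Dict.counter guess.toList).getD ch 0)))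
        (PySem.Dict.counter word.toList)).getD ch 0 =
      (min (word.toList.count ch) (guess.toList.count ch) : Int) - ((0 : Nat) : Int) := by
    intro ch
    rw [pvFoldlInsertMin _ _ (by rw [PySem.Dict.keys_counter]; exact PySem.Set.nodup_ofList _)]
    rw [PySem.Dict.keys_counter]
    by_cases hch : ch ∈ word.toList
    · rw [if_pos ((PySem.Set.mem_ofList _ _).mpr hch)]
      simp [PySem.Dict.getD_counter]
    · rw [if_neg (fun h => hch ((PySem.Set.mem_ofList _ _).mp h))]
      have : word.toList.count ch = 0 := List.count_eq_zero.mpr hch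
      simp [PySem.Dict.getD_counter, this]
  have := pvMainLoop word guess word.toList []
    ((PySem.Dict.counter word.toList).keys.foldl
      (fun d ch => d.insert ch (min (d.getD ch 0) ((PySem.Dict.counter guess.toList).getD ch 0)))
      (PySem.Dict.counter word.toList))
    (by intro ch; simpa using hrem1 ch)
    (by intro ch; simp)
    (by intro ch; simp)
  simpa using this
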